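-- pv_equiv track=rewrite | github.com/BalakrishnanBMW/PhishingDetection | my_prediction.py | doubleSlash
-- ===== SOURCE A (Python) =====
-- def doubleSlash(url):
--     index_list = []
--     start = 0
--     while True:
--         index = url.find("//", start)
--         if index == -1:
--             break
--         index_list.append(index)
--         start = index + 1
--     if len(index_list) == 0:
--         return 0
--     elif len(index_list) > 1 or index_list[-1] != 5 or index_list[-1] != 6:
--         return 1
--     else:
--         return -1
-- ===== SOURCE B (Python) =====
-- def doubleSlash(url):
--     # Presence test only: A's position check is dead code (a value can't equal both 5 and 6),
--     # so any occurrence of '//' yields 1, none yields 0.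
--     return 1 if url.find("//") != -1 else 0
-- ===== Notes on version B (the rewrite author's own statement) =====
-- stated objective: simpler
-- what changed: Replaced the while-loop that collects every '//' index plus the dead position checks (a value cannot be both != 5 and yet force the else) with a single url.find('//') presence test.
import Mathlib
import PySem

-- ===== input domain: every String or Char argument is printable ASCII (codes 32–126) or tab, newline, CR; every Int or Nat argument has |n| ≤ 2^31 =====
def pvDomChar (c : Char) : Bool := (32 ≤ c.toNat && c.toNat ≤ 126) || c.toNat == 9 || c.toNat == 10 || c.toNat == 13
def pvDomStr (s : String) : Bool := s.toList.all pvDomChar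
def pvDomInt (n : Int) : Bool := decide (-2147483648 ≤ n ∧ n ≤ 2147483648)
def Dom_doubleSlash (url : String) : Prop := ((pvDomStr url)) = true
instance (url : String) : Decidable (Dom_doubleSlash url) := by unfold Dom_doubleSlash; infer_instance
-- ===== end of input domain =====

-- B replaces A's index-collecting loop and dead position checks with a single find('//') presence test (simpler).

-- ===== PORT A =====
-- the while-loop of A: collects each occurrence index, restarting the search at index+1.
-- fuel only makes the recursion total; it never runs out (the start position strictly grows,
-- and a match needs at least one following character), so it is a guard, not an algorithm switch.
def dsLoop (url : String) (fuel : Nat) (start : Int) (acc : List Int) : List Int :=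
  match fuel with
  | 0 => acc
  | Nat.succ f =>
    let index := PySem.Str.findFrom url "//" start
    if index = -1 then acc
    else dsLoop url f (index + 1) (acc ++ [index])

def doubleSlash (url : String) : Int :=
  let index_list := dsLoop url (url.toList.length + 1) 0 []
  if index_list.length = 0 then 0
  else if index_list.length > 1 ∨ PySem.List.pyGet? index_list (-1) ≠ some 5 ∨ PySem.List.pyGet? index_list (-1) ≠ some 6 then 1
  else -1

-- ===== PORT B =====
def doubleSlash_alt (url : String) : Int :=
  if PySem.Str.find url "//" ≠ -1 then 1 else 0

-- ===== PRECONDITION & SPEC =====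
def Spec_doubleSlash (url : String) (out : Int) : Prop := out = doubleSlash_alt url
instance (url : String) (out : Int) : Decidable (Spec_doubleSlash url out) := by unfold Spec_doubleSlash; infer_instance

-- ===== CLAIM (what is proved, stated in full; the proofs are below) =====
def Claim_equal_doubleSlash : Prop := ∀ (url : String), Dom_doubleSlash url → Spec_doubleSlash url (doubleSlash url)

-- ===== LEMMAS AND PROOFS =====

theorem dsLoop_ne_nil (url : String) (fuel : Nat) (start : Int) (acc : List Int)
    (h : acc ≠ []) : dsLoop url fuel start acc ≠ [] := by
  induction fuel generalizing start acc with
  | zero => simpa [dsLoop] using h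
  | succ f ih =>
    simp only [dsLoop]
    split
    · exact h
    · exact ih _ _ (by simp)

-- ===== VERDICT (by name: the statement is the Claim_ definition above) =====
theorem doubleSlash_spec : Claim_equal_doubleSlash := by
  intro url _
  unfold Spec_doubleSlash doubleSlash doubleSlash_alt
  simp only [dsLoop]
  by_cases hc : PySem.Chars.find url.toList ['/', '/'] = -1
  · simp [hc]
  · have hne : dsLoop url url.length (PySem.Chars.find url.toList ['/', '/'] + 1)
        [PySem.Chars.find url.toList ['/', '/']] ≠ [] :=
      dsLoop_ne_nil _ _ _ _ (by simp)
    set l := dsLoop url url.length (PySem.Chars.find url.toList ['/', '/'] + 1)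
        [PySem.Chars.find url.toList ['/', '/']] with hl
    have hlen : l.length ≠ 0 := by simpa [List.length_eq_zero_iff] using hne
    have hcond : l.length > 1 ∨ PySem.List.pyGet? l (-1) ≠ some 5 ∨ PySem.List.pyGet? l (-1) ≠ some 6 := by
      rcases eq_or_ne (PySem.List.pyGet? l (-1)) (some 5) with h5 | h5
      · exact Or.inr (Or.inr (by simp [h5]))
      · exact Or.inr (Or.inl h5)
    simp [hc, ← hl, hne, hcond]
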